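-- pv_equiv track=rewrite | github.com/briangalindoherbert/gs_Tokyo2021_v2 | gs_getters.py | get_events_from_bak
-- ===== SOURCE A (Python) =====
-- def get_events_from_bak(disc):
--     """
--     build events table from backup that was read
--     :param disc:
--     :return:
--     """
--     evt_list: list = []
--     evttmp: list = []
--     lim = len(disc) - 1
--     for x in range(len(disc)):
--         if x == 0:
--             thisevt: str = disc[x]['event']
--         evttmp.append(disc[x])
--         if x +1 <= lim:
--             if disc[x+1]['event'] != disc[x]['event']:
--                 evt_list.append(evttmp)
--                 evttmp: list = []
--         elif x == lim:
--             evt_list.append(evttmp)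
--
--     return evt_list
-- ===== SOURCE B (Python) =====
-- def get_events_from_bak(disc):
--     """Two-pointer span grouping: find each run of equal 'event' and slice it out."""
--     res = []
--     n = len(disc)
--     i = 0
--     while i < n:
--         ev = disc[i]['event']
--         j = i + 1
--         while j < n and disc[j]['event'] == ev:
--             j += 1
--         res.append(disc[i:j])
--         i = j
--     return res
-- ===== Notes on version B (the rewrite author's own statement) =====
-- stated objective: simpler
-- what changed: A buffers records while looking one index ahead (disc[x+1]) and flushes the buffer on an event change; B is a two-pointer span scan that, for each run start i, advances j over equal 'event' values and slices disc[i:j] out directly, with no buffer, no lim variable and no lookahead bounds check.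
import Mathlib
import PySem

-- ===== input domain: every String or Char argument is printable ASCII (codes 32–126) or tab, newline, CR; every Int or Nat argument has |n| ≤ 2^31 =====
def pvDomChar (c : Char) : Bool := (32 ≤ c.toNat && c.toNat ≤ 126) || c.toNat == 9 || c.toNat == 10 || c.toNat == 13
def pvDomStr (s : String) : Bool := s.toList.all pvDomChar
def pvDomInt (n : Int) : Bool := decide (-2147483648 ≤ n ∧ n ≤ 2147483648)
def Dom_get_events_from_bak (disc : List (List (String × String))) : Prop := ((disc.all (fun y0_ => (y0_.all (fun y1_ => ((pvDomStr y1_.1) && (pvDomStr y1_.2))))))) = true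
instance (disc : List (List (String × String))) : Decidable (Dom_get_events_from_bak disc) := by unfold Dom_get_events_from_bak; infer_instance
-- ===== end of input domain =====

-- B replaces A's lookahead-and-flush buffer loop by a two-pointer span scan; objective: simpler.

-- d['event'] (first-match association-list lookup); the .getD "" default is never hit under Pre_.
def pvEvent (r : List (String × String)) : String :=
  ((PySem.Dict.mk r).get? "event").getD ""

-- ===== PORT A =====
-- A's local 'thisevt' is assigned once at x == 0 and never read; its only possible effect
-- (KeyError on a record without 'event') is excluded by Pre_, so it is not carried in the state.
-- pvStepA is the body of A's 'for x in range(len(disc))' loop, on the state (evt_list, evttmp).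
def pvStepA (disc : List (List (String × String)))
    (st : List (List (List (String × String))) × List (List (String × String))) (x : Int) :
    List (List (List (String × String))) × List (List (String × String)) :=
  let lim : Int := (disc.length : Int) - 1
  let evt_list := st.1
  let evttmp := st.2 ++ [PySem.List.pyGetD disc x []]
  if x + 1 <= lim then
    if pvEvent (PySem.List.pyGetD disc (x + 1) []) ≠ pvEvent (PySem.List.pyGetD disc x []) then
      (evt_list ++ [evttmp], [])
    else
      (evt_list, evttmp)
  else if x = lim then
    (evt_list ++ [evttmp], evttmp)
  else
    (evt_list, evttmp)

def get_events_from_bak (disc : List (List (String × String))) : List (List (List (String × String))) :=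
  ((PySem.List.pyRange 0 (disc.length : Int) 1).foldl (pvStepA disc) ([], [])).1

-- ===== PORT B =====
-- outer while: recursion on the remaining suffix; inner while advancing j over records whose
-- 'event' equals ev is the matching prefix of the tail (takeWhile), and disc[i:j] / the new i = j
-- are that prefix / the suffix after it (dropWhile).
def get_events_from_bak_alt (disc : List (List (String × String))) : List (List (List (String × String))) :=
  match disc with
  | [] => []
  | d :: rest =>
      (d :: rest.takeWhile (fun r => pvEvent r == pvEvent d)) ::
        get_events_from_bak_alt (rest.dropWhile (fun r => pvEvent r == pvEvent d))
termination_by disc.length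
decreasing_by
  simp only [List.length_cons]
  exact Nat.lt_succ_of_le (List.length_dropWhile_le _ _)

-- ===== PRECONDITION & SPEC =====
-- Pre_: every record has an 'event' key — exactly where the Python A returns (otherwise KeyError).
def Pre_get_events_from_bak (disc : List (List (String × String))) : Prop :=
  ∀ r ∈ disc, ((PySem.Dict.mk r).contains "event") = true
instance (disc : List (List (String × String))) : Decidable (Pre_get_events_from_bak disc) := by unfold Pre_get_events_from_bak; infer_instance

def pvWitness_get_events_from_bak : (List (List (String × String))) :=
  [[("event", "100m"), ("name", "a")], [("event", "100m")], [("event", "200m")]]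

def Spec_get_events_from_bak (disc : List (List (String × String))) (out : List (List (List (String × String)))) : Prop := out = get_events_from_bak_alt disc
instance (disc : List (List (String × String))) (out : List (List (List (String × String)))) : Decidable (Spec_get_events_from_bak disc out) := by unfold Spec_get_events_from_bak; infer_instance

-- ===== CLAIM (what is proved, stated in full; the proofs are below) =====
def Claim_equal_get_events_from_bak : Prop := ∀ (disc : List (List (String × String))), Dom_get_events_from_bak disc → Pre_get_events_from_bak disc → Spec_get_events_from_bak disc (get_events_from_bak disc)

-- ===== LEMMAS AND PROOFS =====

-- A's loop as structural recursion on the remaining suffix (proof-only helper).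
def pvLoopA (l : List (List (String × String)))
    (acc : List (List (List (String × String)))) (tmp : List (List (String × String))) :
    List (List (List (String × String))) :=
  match l with
  | [] => acc
  | [r] => acc ++ [tmp ++ [r]]
  | r :: r' :: t =>
      if pvEvent r' ≠ pvEvent r then pvLoopA (r' :: t) (acc ++ [tmp ++ [r]]) []
      else pvLoopA (r' :: t) acc (tmp ++ [r])

theorem pvLoopA_eq_alt (t : List (List (String × String))) :
    ∀ (r : List (String × String)) acc tmp,
      pvLoopA (r :: t) acc tmp =
        acc ++ (tmp ++ r :: t.takeWhile (fun x => pvEvent x == pvEvent r)) ::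
          get_events_from_bak_alt (t.dropWhile (fun x => pvEvent x == pvEvent r)) := by
  induction t with
  | nil =>
      intro r acc tmp
      simp [pvLoopA, get_events_from_bak_alt]
  | cons r' t' ih =>
      intro r acc tmp
      by_cases h : pvEvent r' = pvEvent r
      · have hpred : (fun x => pvEvent x == pvEvent r') = (fun x => pvEvent x == pvEvent r) := by
          funext x; rw [h]
        simp only [pvLoopA, h, ne_eq, not_true_eq_false, if_false]
        rw [ih r' acc (tmp ++ [r])]
        simp [List.takeWhile, List.dropWhile, h]
      · simp only [pvLoopA, ne_eq, h, not_false_eq_true, if_true]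
        rw [ih r' (acc ++ [tmp ++ [r]]) []]
        have hb : (pvEvent r' == pvEvent r) = false := by simp [h]
        simp [List.takeWhile, List.dropWhile, hb, get_events_from_bak_alt]

theorem pvFoldA_eq_loopA (disc : List (List (String × String))) (m : Nat) :
    ∀ (k : Nat) acc tmp, disc.length = k + m →
      ((PySem.List.pyRange (k : Int) (disc.length : Int) 1).foldl (pvStepA disc) (acc, tmp)).1 =
        pvLoopA (disc.drop k) acc tmp := by
  induction m with
  | zero =>
      intro k acc tmp hm
      rw [PySem.List.pyRange_one_eq_nil (by omega)]
      rw [List.drop_eq_nil_of_le (by omega)]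
      simp [pvLoopA]
  | succ m ih =>
      intro k acc tmp hm
      have hklt : k < disc.length := by omega
      rw [PySem.List.pyRange_one_cons (by exact_mod_cast hklt)]
      rw [List.foldl_cons]
      have hdrop : disc.drop k = disc[k] :: disc.drop (k + 1) :=
        List.drop_eq_getElem_cons hklt
      have hget : PySem.List.pyGetD disc (k : Int) [] = disc[k] := by
        rw [PySem.List.pyGetD_natCast]
        exact List.getD_eq_getElem disc [] hklt
      have hcast : ((k : Int) + 1) = ((k + 1 : Nat) : Int) := by push_cast; ring
      by_cases h2 : k + 2 ≤ disc.length
      · -- x + 1 <= lim : lookahead at disc[k+1]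
        have hk1 : k + 1 < disc.length := by omega
        have hget1 : PySem.List.pyGetD disc ((k : Int) + 1) [] = disc[k + 1] := by
          rw [hcast, PySem.List.pyGetD_natCast]
          exact List.getD_eq_getElem disc [] hk1
        have hcond : (k : Int) + 1 ≤ (disc.length : Int) - 1 := by omega
        have hdrop1 : disc.drop (k + 1) = disc[k + 1] :: disc.drop (k + 2) :=
          List.drop_eq_getElem_cons hk1
        rw [hdrop, hdrop1]
        simp only [pvStepA, hget, hget1]
        rw [if_pos hcond]
        by_cases hne : pvEvent disc[k + 1] ≠ pvEvent disc[k]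
        · rw [if_pos hne]
          simp only [pvLoopA, if_pos hne]
          have := ih (k + 1) (acc ++ [tmp ++ [disc[k]]]) [] (by omega)
          rw [hdrop1] at this
          rw [hcast]
          exact this
        · rw [if_neg hne]
          simp only [pvLoopA, if_neg hne]
          have := ih (k + 1) acc (tmp ++ [disc[k]]) (by omega)
          rw [hdrop1] at this
          rw [hcast]
          exact this
      · -- last element: x == lim
        have hcond : ¬ ((k : Int) + 1 ≤ (disc.length : Int) - 1) := by omega
        have hlim : (k : Int) = (disc.length : Int) - 1 := by omega
        have hnil : disc.drop (k + 1) = [] := List.drop_eq_nil_of_le (by omega)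
        rw [hdrop, hnil]
        simp only [pvStepA, hget]
        rw [if_neg hcond, if_pos hlim]
        rw [PySem.List.pyRange_one_eq_nil (by omega)]
        simp [pvLoopA]

theorem get_events_from_bak_spec : Claim_equal_get_events_from_bak := by
  unfold Claim_equal_get_events_from_bak
  intro disc _ _
  unfold Spec_get_events_from_bak get_events_from_bak
  rw [show (0 : Int) = ((0 : Nat) : Int) from rfl]
  rw [pvFoldA_eq_loopA disc disc.length 0 [] [] (by omega)]
  rw [List.drop_zero]
  cases disc with
  | nil => simp [pvLoopA, get_events_from_bak_alt]
  | cons d rest =>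
      rw [pvLoopA_eq_alt rest d [] []]
      simp [get_events_from_bak_alt]
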